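-- pv_equiv track=rewrite | github.com/modernpacifist/ml-api | preprocessing.py | process_bank_error
-- ===== SOURCE A (Python) =====
-- def process_bank_error(column):
--     # success = 0, denied = 1, error = 2
--     # наша задача заменить error 2 на средний ответ других банков
--     # алгоритм: Если другой банк одобрил заявку, рейтинг человек +1
--     # если отказал, рейтинг -1
--     # итог, если рейтинг больше 0, то мы заменяем error 2 на success 0
--     # иначе на denied 1
--     rating = 0
--     for i in range(len(column)):
--         if column[i] == 2:
--             for j in range(len(column)):
--                 if j != i:
--                     if column[j] == 0:
--                         rating += 1
--                     elif column[j] == 1: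
--                         rating -= 1
--             if rating > 0:
--                 column[i] = 0
--             else:
--                 column[i] = 1
--             rating = 0
--     return column
-- ===== SOURCE B (Python) =====
-- def process_bank_error(column):
--     # Jump straight to each error with list.index, resolving it from running
--     # 0/1 counts computed once; no per-element Python loop at all.
--     # (A mutates its argument in place; B returns a new list instead.)
--     try:
--         i = column.index(2)
--     except ValueError:
--         return column  # nothing to fix
--     c0 = column.count(0)
--     c1 = column.count(1)
--     out = list(column)
--     while True:
--         if c0 > c1:
--             out[i] = 0
--             c0 += 1
--         else:
--             out[i] = 1
--             c1 += 1
--         try: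
--             i = out.index(2, i + 1)
--         except ValueError:
--             return out
-- ===== Notes on version B (the rewrite author's own statement) =====
-- stated objective: alternative
-- what changed: Replace the per-error rescan of the whole column by one-time 0/1 counts plus index()-jumps straight to each error, resolving it from the running counts (A mutates its argument in place; B returns a new list, or the unchanged input when there is no error - the return value is what is proved equal).
import Mathlib
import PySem

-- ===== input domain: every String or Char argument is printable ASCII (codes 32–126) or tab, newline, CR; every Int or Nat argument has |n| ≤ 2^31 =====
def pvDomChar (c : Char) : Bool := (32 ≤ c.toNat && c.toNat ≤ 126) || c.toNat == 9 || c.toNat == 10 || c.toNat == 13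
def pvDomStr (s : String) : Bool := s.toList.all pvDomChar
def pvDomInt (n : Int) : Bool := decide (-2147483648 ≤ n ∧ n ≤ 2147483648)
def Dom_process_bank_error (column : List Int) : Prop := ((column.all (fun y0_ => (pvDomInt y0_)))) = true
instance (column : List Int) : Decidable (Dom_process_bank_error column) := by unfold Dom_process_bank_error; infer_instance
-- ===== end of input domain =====

-- B replaces A's per-error rescan by one-time 0/1 counts and index-jumps to each
-- error; A mutates its argument in place, B returns a new list (or the unchanged
-- input) — the equivalence proved is about the return value.

-- ===== PORT A =====
-- contribution of index j (j ≠ i) to the rating, as in A's inner loop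
def pvRatingStep (col : List Int) (i : Nat) (r : Int) (j : Nat) : Int :=
  if j ≠ i then
    if col.getD j 0 = 0 then r + 1
    else if col.getD j 0 = 1 then r - 1
    else r
  else r

-- one iteration of A's outer loop (index i of range(len(column)))
def pvOuterStep (col : List Int) (i : Nat) : List Int :=
  if col.getD i 0 = 2 then
    let rating := (List.range col.length).foldl (pvRatingStep col i) 0
    if rating > 0 then col.set i 0 else col.set i 1
  else col

def process_bank_error (column : List Int) : List Int :=
  (List.range column.length).foldl pvOuterStep column

-- ===== PORT B =====
-- B's while loop: out[i] is a 2; resolve it from the counts, then jump to the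
-- next 2 with index (out.index(2, i+1) is ported as index? on out.drop (i+1))
def pvWhile (c0 c1 : Int) (out : List Int) (i : Nat) : List Int :=
  let c0' := if c0 > c1 then c0 + 1 else c0
  let c1' := if c0 > c1 then c1 else c1 + 1
  let out' := if c0 > c1 then out.set i 0 else out.set i 1
  match h : PySem.List.index? (out'.drop (i + 1)) 2 with
  | none => out'
  | some k => pvWhile c0' c1' out' (i + 1 + k)
termination_by out.length - i
decreasing_by
  obtain ⟨hk, -, -⟩ := PySem.List.getElem_of_index?_eq_some h
  simp only [List.length_drop, out'] at hk ⊢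
  by_cases hc : c0 > c1 <;> simp only [hc] at hk ⊢ <;> simp at hk ⊢ <;> omega

def process_bank_error_alt (column : List Int) : List Int :=
  match PySem.List.index? column 2 with
  | none => column
  | some i => pvWhile (PySem.List.count column 0) (PySem.List.count column 1) column i

-- ===== PRECONDITION & SPEC =====
def Spec_process_bank_error (column : List Int) (out : List Int) : Prop := out = process_bank_error_alt column
instance (column : List Int) (out : List Int) : Decidable (Spec_process_bank_error column out) := by unfold Spec_process_bank_error; infer_instance

-- ===== CLAIM (what is proved, stated in full; the proofs are below) =====
def Claim_equal_process_bank_error : Prop := ∀ (column : List Int), Dom_process_bank_error column → Spec_process_bank_error column (process_bank_error column)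

-- ===== LEMMAS AND PROOFS =====

-- reference single-pass loop with running counts; both ports are proved equal to it
def pvAltLoop (c0 c1 : Int) : List Int → List Int
  | [] => []
  | v :: rest =>
    if v = 2 then
      if c0 > c1 then 0 :: pvAltLoop (c0 + 1) c1 rest
      else 1 :: pvAltLoop c0 (c1 + 1) rest
    else v :: pvAltLoop c0 c1 rest

-- signed contribution of one element to A's rating
def pvC (v : Int) : Int := if v = 0 then 1 else if v = 1 then -1 else 0

def pvSumC : List Int → Int
  | [] => 0
  | v :: l => pvC v + pvSumC l

lemma pvSumC_eq_counts (l : List Int) :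
    pvSumC l = (l.count 0 : Int) - (l.count 1 : Int) := by
  induction l with
  | nil => simp [pvSumC]
  | cons v l ih =>
    by_cases h0 : v = 0
    · subst h0; simp [pvSumC, pvC, ih]; ring
    · by_cases h1 : v = 1
      · subst h1; simp [pvSumC, pvC, ih, h0]; ring
      · have h0' : ¬ ((0:Int) = v) := fun h => h0 h.symm
        have h1' : ¬ ((1:Int) = v) := fun h => h1 h.symm
        simp [pvSumC, pvC, h0, h1, ih]

lemma pvSumC_append (l1 l2 : List Int) : pvSumC (l1 ++ l2) = pvSumC l1 + pvSumC l2 := by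
  induction l1 with
  | nil => simp [pvSumC]
  | cons a l1 ih => simp [pvSumC, ih]; ring

lemma getD_append_len (pre tail : List Int) (v d : Int) :
    (pre ++ v :: tail).getD pre.length d = v := by
  induction pre with
  | nil => simp
  | cons a pre ih => simp

lemma set_append_len (pre tail : List Int) (v w : Int) :
    (pre ++ v :: tail).set pre.length w = pre ++ w :: tail := by
  induction pre with
  | nil => simp
  | cons a pre ih => simp [ih]

-- the rating fold over a segment whose indices all differ from i sums pvC of the segment
lemma rating_seg (i : Nat) (col : List Int) :
    ∀ (seg pre : List Int) (tail : List Int) (r : Int),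
      col = pre ++ seg ++ tail →
      (∀ j, pre.length ≤ j → j < pre.length + seg.length → j ≠ i) →
      (List.range' pre.length seg.length).foldl (pvRatingStep col i) r = r + pvSumC seg := by
  intro seg
  induction seg with
  | nil => intro pre tail r _ _; simp [pvSumC]
  | cons v seg ih =>
    intro pre tail r hcol hne
    have hj : pre.length ≠ i := hne _ le_rfl (by simp)
    have hget : col.getD pre.length 0 = v := by
      rw [hcol, show pre ++ (v :: seg) ++ tail = pre ++ v :: (seg ++ tail) by simp]
      exact getD_append_len _ _ _ _
    have hstep : pvRatingStep col i r pre.length = r + pvC v := by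
      simp only [pvRatingStep, pvC, hget, if_pos hj]
      split_ifs <;> ring
    show List.foldl (pvRatingStep col i) r (List.range' pre.length (seg.length + 1)) = _
    rw [List.range'_succ, List.foldl_cons, hstep]
    have hcol' : col = (pre ++ [v]) ++ seg ++ tail := by simp [hcol]
    have := ih (pre ++ [v]) tail (r + pvC v) hcol'
      (by intro j h1 h2; apply hne j <;> simp_all <;> omega)
    simpa [pvSumC, add_assoc] using this

-- A's rating at an error position equals (count 0) - (count 1) of the whole column
lemma rating_eq (pre tail : List Int) :
    (List.range (pre ++ 2 :: tail).length).foldl (pvRatingStep (pre ++ 2 :: tail) pre.length) 0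
      = ((pre ++ 2 :: tail).count 0 : Int) - ((pre ++ 2 :: tail).count 1 : Int) := by
  set col := pre ++ 2 :: tail with hcol
  have hlen : col.length = pre.length + (1 + tail.length) := by simp [hcol]; omega
  have hsplit : List.range col.length
      = List.range' 0 pre.length ++ (List.range' pre.length 1 ++ List.range' (pre.length + 1) tail.length) := by
    rw [List.range_eq_range', hlen, ← List.range'_append_1, ← List.range'_append_1]
    simp
  rw [hsplit, List.foldl_append, List.foldl_append]
  have h1 : (List.range' 0 pre.length).foldl (pvRatingStep col pre.length) 0 = pvSumC pre := by
    have := rating_seg pre.length col pre [] (2 :: tail) 0 (by simp [hcol]) (by intro j h1 h2; simp only [List.length_nil] at h1 h2; omega)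
    simpa using this
  have h2 : (List.range' pre.length 1).foldl (pvRatingStep col pre.length) (pvSumC pre) = pvSumC pre := by
    simp [pvRatingStep]
  have h3 : (List.range' (pre.length + 1) tail.length).foldl (pvRatingStep col pre.length) (pvSumC pre)
      = pvSumC pre + pvSumC tail := by
    have := rating_seg pre.length col tail (pre ++ [2]) [] (pvSumC pre)
      (by simp [hcol])
      (by intro j hj1 hj2
          simp only [List.length_append, List.length_cons, List.length_nil] at hj1
          omega)
    simpa using this
  rw [h1, h2, h3]
  have : ((col.count 0 : Int)) - (col.count 1 : Int) = pvSumC col := (pvSumC_eq_counts col).symm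
  rw [this, hcol, pvSumC_append]
  simp [pvSumC, pvC]

-- the main invariant: running A's loop from index pre.length on pre ++ post
-- equals pre ++ B's loop on post with the current full counts
lemma main_inv : ∀ (post pre : List Int),
    (List.range' pre.length post.length).foldl pvOuterStep (pre ++ post)
      = pre ++ pvAltLoop ((pre ++ post).count 0 : Int) ((pre ++ post).count 1 : Int) post := by
  intro post
  induction post with
  | nil => intro pre; simp [pvAltLoop]
  | cons v rest ih =>
    intro pre
    show List.foldl pvOuterStep (pre ++ v :: rest) (List.range' pre.length (rest.length + 1)) = _
    rw [List.range'_succ, List.foldl_cons]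
    by_cases hv : v = 2
    · subst hv
      have hget : (pre ++ 2 :: rest).getD pre.length 0 = 2 := getD_append_len _ _ _ _
      have hrat := rating_eq pre rest
      by_cases hgt : ((pre ++ (2:Int) :: rest).count 0 : Int) - ((pre ++ (2:Int) :: rest).count 1 : Int) > 0
      · have hstep : pvOuterStep (pre ++ 2 :: rest) pre.length = pre ++ 0 :: rest := by
          simp only [pvOuterStep, hget, hrat, if_pos hgt]
          exact set_append_len _ _ _ _
        rw [hstep]
        have := ih (pre ++ [0])
        simp only [List.length_append, List.length_cons, List.length_nil,
          List.append_assoc, List.cons_append, List.nil_append] at this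
        rw [this]
        have hc0 : ((pre ++ (0:Int) :: rest).count 0 : Int) = ((pre ++ (2:Int) :: rest).count 0 : Int) + 1 := by
          simp [List.count_append]; ring
        have hc1 : ((pre ++ (0:Int) :: rest).count 1 : Int) = ((pre ++ (2:Int) :: rest).count 1 : Int) := by
          simp [List.count_append]
        rw [hc0, hc1] at this
        have halt : pvAltLoop ((pre ++ (2:Int) :: rest).count 0 : Int) ((pre ++ (2:Int) :: rest).count 1 : Int) (2 :: rest)
            = 0 :: pvAltLoop (((pre ++ (2:Int) :: rest).count 0 : Int) + 1) ((pre ++ (2:Int) :: rest).count 1 : Int) rest := by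
          simp only [pvAltLoop]
          rw [if_pos trivial, if_pos (by omega)]
        rw [halt]
        simpa [add_assoc] using this
      · have hstep : pvOuterStep (pre ++ 2 :: rest) pre.length = pre ++ 1 :: rest := by
          simp only [pvOuterStep, hget, hrat, if_neg hgt]
          exact set_append_len _ _ _ _
        rw [hstep]
        have := ih (pre ++ [1])
        simp only [List.length_append, List.length_cons, List.length_nil,
          List.append_assoc, List.cons_append, List.nil_append] at this
        rw [this]
        have hc0 : ((pre ++ (1:Int) :: rest).count 0 : Int) = ((pre ++ (2:Int) :: rest).count 0 : Int) := by
          simp [List.count_append]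
        have hc1 : ((pre ++ (1:Int) :: rest).count 1 : Int) = ((pre ++ (2:Int) :: rest).count 1 : Int) + 1 := by
          simp [List.count_append]; ring
        rw [hc0, hc1] at this
        have halt : pvAltLoop ((pre ++ (2:Int) :: rest).count 0 : Int) ((pre ++ (2:Int) :: rest).count 1 : Int) (2 :: rest)
            = 1 :: pvAltLoop ((pre ++ (2:Int) :: rest).count 0 : Int) (((pre ++ (2:Int) :: rest).count 1 : Int) + 1) rest := by
          simp only [pvAltLoop]
          rw [if_pos trivial, if_neg (by omega)]
        rw [halt]
        simpa [add_assoc] using this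
    · have hget : (pre ++ v :: rest).getD pre.length 0 = v := getD_append_len _ _ _ _
      have hstep : pvOuterStep (pre ++ v :: rest) pre.length = pre ++ v :: rest := by
        simp [pvOuterStep, hv]
      rw [hstep]
      have := ih (pre ++ [v])
      simp only [List.length_append, List.length_cons, List.length_nil,
        List.append_assoc, List.cons_append, List.nil_append] at this
      have halt : pvAltLoop ((pre ++ v :: rest).count 0 : Int) ((pre ++ v :: rest).count 1 : Int) (v :: rest)
          = v :: pvAltLoop ((pre ++ v :: rest).count 0 : Int) ((pre ++ v :: rest).count 1 : Int) rest := by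
        simp only [pvAltLoop]
        rw [if_neg hv]
      rw [halt]
      simpa using this

lemma drop_append_len (pre tail : List Int) (v : Int) :
    (pre ++ v :: tail).drop (pre.length + 1) = tail := by
  induction pre with
  | nil => simp
  | cons a pre ih => simpa using ih

-- pvAltLoop passes a 2-free prefix through unchanged, keeping the counts
lemma altLoop_append_no2 (c0 c1 : Int) (seg t : List Int) (h2 : (2:Int) ∉ seg) :
    pvAltLoop c0 c1 (seg ++ t) = seg ++ pvAltLoop c0 c1 t := by
  induction seg with
  | nil => simp
  | cons v seg ih =>
    have hv : v ≠ 2 := fun h => h2 (by simp [h])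
    simp only [List.cons_append, pvAltLoop, if_neg hv]
    rw [ih (fun h => h2 (List.mem_cons_of_mem _ h))]

lemma altLoop_no2 (c0 c1 : Int) (l : List Int) (h2 : (2:Int) ∉ l) :
    pvAltLoop c0 c1 l = l := by
  simpa [pvAltLoop] using altLoop_append_no2 c0 c1 l [] h2

-- non-dependent unfolding of pvWhile (the definition's match carries an Eq proof
-- for termination; this form lets simp rewrite the scrutinee)
lemma pvWhile_unfold (c0 c1 : Int) (out : List Int) (i : Nat) :
    pvWhile c0 c1 out i =
      match PySem.List.index? ((if c0 > c1 then out.set i 0 else out.set i 1).drop (i + 1)) 2 with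
      | none => if c0 > c1 then out.set i 0 else out.set i 1
      | some k =>
        pvWhile (if c0 > c1 then c0 + 1 else c0) (if c0 > c1 then c1 else c1 + 1)
          (if c0 > c1 then out.set i 0 else out.set i 1) (i + 1 + k) := by
  rw [pvWhile]
  split <;> rename_i heq <;> rw [PySem.List.index?_eq_idxOf?] at heq <;> simp [heq]

-- B's while loop, started at an error position, equals the single-pass loop
lemma pvWhile_eq (n : Nat) : ∀ (rest pre : List Int) (c0 c1 : Int), rest.length ≤ n →
    pvWhile c0 c1 (pre ++ 2 :: rest) pre.length = pre ++ pvAltLoop c0 c1 (2 :: rest) := by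
  induction n with
  | zero =>
    intro rest pre c0 c1 hn
    have hrest : rest = [] := List.eq_nil_of_length_eq_zero (Nat.le_zero.mp hn)
    subst hrest
    rw [pvWhile_unfold]
    by_cases hc : c0 > c1 <;>
      simp [hc, set_append_len, drop_append_len, pvAltLoop,
        PySem.List.index?_eq_idxOf?]
  | succ n ih =>
    intro rest pre c0 c1 hn
    rw [pvWhile_unfold]
    by_cases hc : c0 > c1
    · simp only [if_pos hc, set_append_len, drop_append_len]
      rcases hidx : PySem.List.index? rest 2 with _ | k
      · have h2 : (2:Int) ∉ rest := (PySem.List.index?_eq_none_iff _ _).mp hidx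
        simp [pvAltLoop, hc, altLoop_no2 _ _ _ h2]
      · obtain ⟨seg, suf, hrest, hlen, hseg⟩ := (PySem.List.index?_eq_some_iff _ _ _).mp hidx
        subst hrest
        have hre : pre ++ (0:Int) :: (seg ++ 2 :: suf) = (pre ++ 0 :: seg) ++ 2 :: suf := by simp
        have hidxlen : pre.length + 1 + k = (pre ++ (0:Int) :: seg).length := by simp; omega
        simp only [hre, hidxlen]
        rw [ih suf (pre ++ 0 :: seg) (c0 + 1) c1 (by simp at hn ⊢; omega)]
        have halt : pvAltLoop c0 c1 (2 :: (seg ++ 2 :: suf))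
            = 0 :: (seg ++ pvAltLoop (c0 + 1) c1 (2 :: suf)) := by
          rw [show pvAltLoop c0 c1 (2 :: (seg ++ 2 :: suf))
              = if c0 > c1 then 0 :: pvAltLoop (c0 + 1) c1 (seg ++ 2 :: suf)
                else 1 :: pvAltLoop c0 (c1 + 1) (seg ++ 2 :: suf) from rfl,
            if_pos hc, altLoop_append_no2 _ _ _ _ hseg]
        rw [halt]; simp
    · simp only [if_neg hc, set_append_len, drop_append_len]
      rcases hidx : PySem.List.index? rest 2 with _ | k
      · have h2 : (2:Int) ∉ rest := (PySem.List.index?_eq_none_iff _ _).mp hidx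
        simp [pvAltLoop, hc, altLoop_no2 _ _ _ h2]
      · obtain ⟨seg, suf, hrest, hlen, hseg⟩ := (PySem.List.index?_eq_some_iff _ _ _).mp hidx
        subst hrest
        have hre : pre ++ (1:Int) :: (seg ++ 2 :: suf) = (pre ++ 1 :: seg) ++ 2 :: suf := by simp
        have hidxlen : pre.length + 1 + k = (pre ++ (1:Int) :: seg).length := by simp; omega
        simp only [hre, hidxlen]
        rw [ih suf (pre ++ 1 :: seg) c0 (c1 + 1) (by simp at hn ⊢; omega)]
        have halt : pvAltLoop c0 c1 (2 :: (seg ++ 2 :: suf))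
            = 1 :: (seg ++ pvAltLoop c0 (c1 + 1) (2 :: suf)) := by
          rw [show pvAltLoop c0 c1 (2 :: (seg ++ 2 :: suf))
              = if c0 > c1 then 0 :: pvAltLoop (c0 + 1) c1 (seg ++ 2 :: suf)
                else 1 :: pvAltLoop c0 (c1 + 1) (seg ++ 2 :: suf) from rfl,
            if_neg hc, altLoop_append_no2 _ _ _ _ hseg]
        rw [halt]; simp

-- B's port equals the single-pass loop on the whole column
lemma alt_eq_altLoop (column : List Int) :
    process_bank_error_alt column
      = pvAltLoop (column.count 0 : Int) (column.count 1 : Int) column := by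
  unfold process_bank_error_alt
  match hidx : PySem.List.index? column 2 with
  | none =>
    have h2 : (2:Int) ∉ column := (PySem.List.index?_eq_none_iff _ _).mp hidx
    rw [altLoop_no2 _ _ _ h2]
  | some i =>
    obtain ⟨pre, suf, hcol, hlen, hpre⟩ := (PySem.List.index?_eq_some_iff _ _ _).mp hidx
    subst hcol
    rw [PySem.List.count_eq, PySem.List.count_eq, ← hlen]
    show pvWhile _ _ _ pre.length = _
    rw [pvWhile_eq suf.length suf pre _ _ le_rfl,
      altLoop_append_no2 _ _ _ _ hpre]

-- ===== VERDICT (by name: the statement is the Claim_ definition above) =====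
theorem process_bank_error_spec : Claim_equal_process_bank_error := by
  intro column _
  show process_bank_error column = process_bank_error_alt column
  rw [alt_eq_altLoop]
  have := main_inv column []
  simpa [process_bank_error, List.range_eq_range'] using this
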